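-- pv_equiv track=rewrite | github.com/vinares/Leet | Interview/PureStorage.py | compute_number_score
-- ===== SOURCE A (Python) =====
-- def compute_number_score(n):
--     score = 0
--     if (n%3 == 0):
--         score += 2
--     num = str(n)
--     i, length = 0, len(num)
--     N = 0
--     five = 0
--     prev = -1
--     while i < length:
--         cur = num[i]
--         if cur=='7':
--             score += 1
--         if int(cur) % 2 == 0:
--             score += 4
--         if cur == '5':
--             if five != 0:
--                 score += 3
--             five += 1
--         else:
--             five = 0
--         if int(cur) + 1 == prev:
--             N += 1
--         else:
--             score += N ** 2
--             N = 1
--         prev = int(cur)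
--         i +=1
--     score += N ** 2
--     return score
-- ===== SOURCE B (Python) =====
-- def compute_number_score(n):
--     # digit-arithmetic version: scan digits right-to-left via % 10 and // 10,
--     # never converting to a string
--     score = 2 if n % 3 == 0 else 0
--     d = n % 10
--     score += (1 if d == 7 else 0) + (4 if d % 2 == 0 else 0)
--     prev = d
--     run, runs = 1, 0
--     m = n // 10
--     while m > 0:
--         d = m % 10
--         score += (1 if d == 7 else 0) + (4 if d % 2 == 0 else 0)
--         if d == 5 and prev == 5:
--             score += 3
--         if d == prev + 1:
--             run += 1
--         else:
--             runs += run * run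
--             run = 1
--         prev = d
--         m //= 10
--     return score + runs + run * run
-- ===== Notes on version B (the rewrite author's own statement) =====
-- stated objective: alternative
-- what changed: B never builds the digit string: it extracts digits arithmetically by repeated modulus and floor-division by ten and scans them right-to-left (least-significant first), turning A's left-to-right char loop into a reversed numeric scan (descending runs become successor chains, the five-streak state becomes an adjacent-pair test against the previous digit).
import Mathlib
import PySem

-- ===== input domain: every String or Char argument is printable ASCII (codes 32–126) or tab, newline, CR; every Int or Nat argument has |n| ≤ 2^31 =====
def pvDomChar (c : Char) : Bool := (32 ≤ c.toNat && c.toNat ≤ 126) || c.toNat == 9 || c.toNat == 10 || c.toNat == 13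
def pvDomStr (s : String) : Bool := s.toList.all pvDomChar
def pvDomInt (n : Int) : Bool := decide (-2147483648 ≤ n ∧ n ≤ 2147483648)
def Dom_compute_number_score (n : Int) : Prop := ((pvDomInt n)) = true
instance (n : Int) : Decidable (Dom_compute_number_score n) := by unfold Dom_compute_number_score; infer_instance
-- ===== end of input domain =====

-- B never builds the digit string: it extracts digits arithmetically by modulus and
-- floor-division by ten, scanning them right-to-left in one numeric loop; objective: alternative algorithm, not speed.

-- ===== PORT A =====
-- int(cur): none = ValueError (non-digit char, i.e. negative n); excluded by Pre_
def pvCharInt (c : Char) : Int := (PySem.Int.ofChars? [c]).getD 0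

def pvLoopA : List Char → Int → Int → Int → Int → Int
  | [], score, _five, _prev, N => score + N ^ 2
  | c :: rest, score, five, prev, N =>
    let score1 := if c = '7' then score + 1 else score
    let score2 := if PySem.Int.mod (pvCharInt c) 2 = 0 then score1 + 4 else score1
    let score3 := if c = '5' then (if five ≠ 0 then score2 + 3 else score2) else score2
    let five' : Int := if c = '5' then five + 1 else 0
    let score4 := if pvCharInt c + 1 = prev then score3 else score3 + N ^ 2
    let N' : Int := if pvCharInt c + 1 = prev then N + 1 else 1
    pvLoopA rest score4 five' (pvCharInt c) N'

def compute_number_score (n : Int) : Int :=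
  let score : Int := if PySem.Int.mod n 3 = 0 then 0 + 2 else 0
  pvLoopA (PySem.Int.toStr n).toList score 0 (-1) 0

-- ===== PORT B =====
-- the while-loop of Source B: m, prev, run, score, runs are the Python locals
def pvLoopB (m prev run score runs : Int) : Int :=
  if _h : 0 < m then
    let d := PySem.Int.mod m 10
    let score1 := score + (if d = 7 then 1 else 0) + (if PySem.Int.mod d 2 = 0 then 4 else 0)
    let score2 := if d = 5 ∧ prev = 5 then score1 + 3 else score1
    if d = prev + 1 then pvLoopB (PySem.Int.floordiv m 10) d (run + 1) score2 runs
    else pvLoopB (PySem.Int.floordiv m 10) d 1 score2 (runs + run * run)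
  else score + runs + run * run
termination_by m.toNat
decreasing_by
  all_goals rw [PySem.Int.floordiv_eq_ediv_of_pos (by omega : (0:Int) < 10)]; omega

def compute_number_score_alt (n : Int) : Int :=
  let score0 : Int := if PySem.Int.mod n 3 = 0 then 2 else 0
  let d := PySem.Int.mod n 10
  let score1 := score0 + (if d = 7 then 1 else 0) + (if PySem.Int.mod d 2 = 0 then 4 else 0)
  pvLoopB (PySem.Int.floordiv n 10) d 1 score1 0

-- ===== PRECONDITION & SPEC =====
-- Pre_ excludes negative n, where str(n) contains a minus sign and int('-') raises ValueError in A.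
def Pre_compute_number_score (n : Int) : Prop := 0 ≤ n
instance (n : Int) : Decidable (Pre_compute_number_score n) := by unfold Pre_compute_number_score; infer_instance
def pvWitness_compute_number_score : Int := (7564)

def Spec_compute_number_score (n : Int) (out : Int) : Prop := out = compute_number_score_alt n
instance (n : Int) (out : Int) : Decidable (Spec_compute_number_score n out) := by unfold Spec_compute_number_score; infer_instance

-- ===== CLAIM (what is proved, stated in full; the proofs are below) =====
def Claim_equal_compute_number_score : Prop := ∀ (n : Int), Dom_compute_number_score n → Pre_compute_number_score n → Spec_compute_number_score n (compute_number_score n)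

-- ===== LEMMAS AND PROOFS =====

-- LSD-first digit list of a nonnegative integer, by the same arithmetic as B's loop
def pvRevDigits (m : Int) : List Int :=
  if _h : 0 < m then PySem.Int.mod m 10 :: pvRevDigits (PySem.Int.floordiv m 10) else []
termination_by m.toNat
decreasing_by
  rw [PySem.Int.floordiv_eq_ediv_of_pos (by omega : (0:Int) < 10)]; omega

-- LSD-first digit list of a Nat (mirrors Nat.toDigits)
def pvDigitsRevN (n : Nat) : List Nat :=
  if h : n < 10 then [n] else n % 10 :: pvDigitsRevN (n / 10)
termination_by n
decreasing_by omega

-- per-digit score (7-bonus and even-bonus)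
def pvDigScore (d : Int) : Int := (if d = 7 then 1 else 0) + (if PySem.Int.mod d 2 = 0 then 4 else 0)

def pvSumDig : List Int → Int
  | [] => 0
  | d :: l => pvDigScore d + pvSumDig l

-- adjacent (5,5) pair count of an MSD-first list
def pvPairs5I : List Int → Int
  | [] => 0
  | [_] => 0
  | a :: b :: l => (if a = 5 ∧ b = 5 then 1 else 0) + pvPairs5I (b :: l)

-- A's five-streak bonus, int level, MSD-first
def pvFiveAI : List Int → Int → Int
  | [], _ => 0
  | d :: l, five =>
    if d = 5 then (if five ≠ 0 then 1 else 0) + pvFiveAI l (five + 1)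
    else pvFiveAI l 0

-- A's run bonus, MSD-first scan with state (prev, r) and an extra seed e added to the FINAL run
def pvRunAs : List Int → Int → Int → Int → Int
  | [], _, r, e => (r + e) ^ 2
  | c :: l, p, r, e => if c + 1 = p then pvRunAs l c (r + 1) e else r ^ 2 + pvRunAs l c 1 e

-- B's run bonus, LSD-first scan
def pvRunR : List Int → Int → Int → Int
  | [], _, run => run * run
  | d :: l, prev, run => if d = prev + 1 then pvRunR l d (run + 1) else run * run + pvRunR l d 1

-- B's five bonus, LSD-first scan
def pvFiveR : List Int → Int → Int
  | [], _ => 0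
  | d :: l, prev => (if d = 5 ∧ prev = 5 then 1 else 0) + pvFiveR l d

-- A's loop at the int level
def pvLoopAI : List Int → Int → Int → Int → Int → Int
  | [], score, _five, _prev, N => score + N ^ 2
  | d :: rest, score, five, prev, N =>
    let score1 := if d = 7 then score + 1 else score
    let score2 := if PySem.Int.mod d 2 = 0 then score1 + 4 else score1
    let score3 := if d = 5 then (if five ≠ 0 then score2 + 3 else score2) else score2
    let five' : Int := if d = 5 then five + 1 else 0
    let score4 := if d + 1 = prev then score3 else score3 + N ^ 2
    let N' : Int := if d + 1 = prev then N + 1 else 1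
    pvLoopAI rest score4 five' d N'

-- digit-char facts (d < 10)
theorem pvCharInt_digitChar (d : Nat) (h : d < 10) : pvCharInt (Nat.digitChar d) = (d : Int) := by
  interval_cases d <;> decide

theorem pvDigitChar_eq7 (d : Nat) (h : d < 10) : (Nat.digitChar d = '7') ↔ ((d : Int) = 7) := by
  interval_cases d <;> decide

theorem pvDigitChar_eq5 (d : Nat) (h : d < 10) : (Nat.digitChar d = '5') ↔ ((d : Int) = 5) := by
  interval_cases d <;> decide

-- pvLoopA on digit chars = pvLoopAI on the digits
theorem pvLoopA_toI (l : List Nat) : ∀ (score five prev N : Int), (∀ d ∈ l, d < 10) →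
    pvLoopA (l.map Nat.digitChar) score five prev N
      = pvLoopAI (l.map (Nat.cast : Nat → Int)) score five prev N := by
  induction l with
  | nil => intro score five prev N _; rfl
  | cons d l ih =>
    intro score five prev N h
    have hd : d < 10 := h d (by simp)
    simp only [List.map_cons, pvLoopA, pvLoopAI,
      pvCharInt_digitChar d hd]
    simp only [pvDigitChar_eq7 d hd, pvDigitChar_eq5 d hd]
    exact ih _ _ _ _ (fun x hx => h x (by simp [hx]))

-- decomposition of A's loop into components
theorem pvLoopAI_decomp (l : List Int) : ∀ (score five prev N : Int),
    pvLoopAI l score five prev N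
      = score + pvSumDig l + 3 * pvFiveAI l five + pvRunAs l prev N 0 := by
  induction l with
  | nil => intro score five prev N; simp [pvLoopAI, pvSumDig, pvFiveAI, pvRunAs]
  | cons d l ih =>
    intro score five prev N
    simp only [pvLoopAI, pvSumDig, pvFiveAI, pvRunAs, pvDigScore, ih]
    split_ifs <;> ring_nf

-- A's five-streak from state 0 counts adjacent (5,5) pairs
theorem pvFiveAI_pairs (l : List Int) : ∀ (five : Int), 0 ≤ five →
    pvFiveAI l five = (if five ≠ 0 ∧ l.head? = some 5 then 1 else 0) + pvPairs5I l := by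
  induction l with
  | nil => intro five _; simp [pvFiveAI, pvPairs5I]
  | cons d l ih =>
    intro five hf
    cases l with
    | nil =>
      by_cases h5 : d = 5 <;> by_cases hz : five ≠ 0 <;>
        simp [pvFiveAI, pvPairs5I, h5, hz]
    | cons b l' =>
      by_cases h5 : d = 5
      · have e1 : pvFiveAI (d :: b :: l') five
            = (if five ≠ 0 then 1 else 0) + pvFiveAI (b :: l') (five + 1) := by
          simp [pvFiveAI, h5]
        rw [e1, ih (five + 1) (by omega)]
        have h1 : five + 1 ≠ 0 := by omega
        by_cases hz : five ≠ 0 <;> by_cases hb : b = 5 <;>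
          simp [pvPairs5I, h5, hz, hb, h1]
      · have e1 : pvFiveAI (d :: b :: l') five = pvFiveAI (b :: l') 0 := by
          simp [pvFiveAI, h5]
        rw [e1, ih 0 le_rfl]
        simp [pvPairs5I, h5]

-- append-a-digit lemma for the pair count
theorem pvPairs5I_append (l : List Int) (x : Int) :
    pvPairs5I (l ++ [x]) = pvPairs5I l + (if l.getLast? = some 5 ∧ x = 5 then 1 else 0) := by
  induction l with
  | nil => simp [pvPairs5I]
  | cons a l ih =>
    cases l with
    | nil =>
      simp only [List.cons_append, List.nil_append, pvPairs5I, List.getLast?_singleton]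
      split_ifs <;> simp_all
    | cons b l' =>
      have e1 : pvPairs5I (a :: b :: (l' ++ [x]))
          = (if a = 5 ∧ b = 5 then 1 else 0) + pvPairs5I (b :: (l' ++ [x])) := by
        simp [pvPairs5I]
      rw [List.cons_append, List.cons_append, e1, ← List.cons_append, ih]
      simp only [pvPairs5I, List.getLast?_cons_cons]
      ring_nf

-- the reversed pair count is B's five scan
theorem pvFiveR_pairs (l : List Int) : ∀ (prev : Int),
    pvPairs5I (l.reverse ++ [prev]) = pvFiveR l prev := by
  induction l with
  | nil => intro prev; simp [pvPairs5I, pvFiveR]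
  | cons d l ih =>
    intro prev
    have : (d :: l).reverse ++ [prev] = (l.reverse ++ [d]) ++ [prev] := by simp
    rw [this, pvPairs5I_append, ih d]
    have hl : (l.reverse ++ [d]).getLast? = some d := by simp
    simp only [pvFiveR, hl, Option.some.injEq]
    ring_nf

-- sum of digit scores: append and reverse
theorem pvSumDig_append (l l' : List Int) : pvSumDig (l ++ l') = pvSumDig l + pvSumDig l' := by
  induction l with
  | nil => simp [pvSumDig]
  | cons d l ih => simp [pvSumDig, ih]; ring_nf

theorem pvSumDig_reverse (l : List Int) : pvSumDig l.reverse = pvSumDig l := by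
  induction l with
  | nil => rfl
  | cons d l ih => simp [pvSumDig, pvSumDig_append, ih]; ring_nf

-- append-a-digit lemma for the seeded run scan
theorem pvRunAs_append (l : List Int) : ∀ (p r e x : Int),
    pvRunAs (l ++ [x]) p r e
      = if x + 1 = l.getLastD p then pvRunAs l p r (e + 1)
        else pvRunAs l p r 0 + (1 + e) ^ 2 := by
  induction l with
  | nil =>
    intro p r e x
    simp only [List.nil_append, pvRunAs, List.getLastD_nil]
    split_ifs <;> ring_nf
  | cons c l ih =>
    intro p r e x
    simp only [List.cons_append, pvRunAs, ih, List.getLastD_cons]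
    split_ifs <;> ring_nf

-- MSD-first run bonus of a nonempty list, with seed e on the final run
def pvRunF : List Int → Int → Int
  | [], _ => 0
  | y :: ys, e => pvRunAs ys y 1 e

theorem pvRunF_append (M : List Int) (x e : Int) (hM : M ≠ []) :
    pvRunF (M ++ [x]) e
      = if x + 1 = M.getLastD 0 then pvRunF M (e + 1)
        else pvRunF M 0 + (1 + e) ^ 2 := by
  cases M with
  | nil => exact absurd rfl hM
  | cons y ys =>
    simp only [List.cons_append, pvRunF, List.getLastD_cons]
    exact pvRunAs_append ys y 1 e x

theorem pvRunF_start (M : List Int) (hM : M ≠ []) :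
    pvRunAs M (-1) 0 0 = pvRunF M 0 := by
  cases M with
  | nil => exact absurd rfl hM
  | cons y ys =>
    simp only [pvRunAs, pvRunF]
    split_ifs with h
    · norm_num
    · simp

-- B's LSD run scan equals the MSD seeded scan of the reversed digits
theorem pvRunR_rev (l : List Int) : ∀ (prev run : Int),
    pvRunR l prev run = pvRunF (l.reverse ++ [prev]) (run - 1) := by
  induction l with
  | nil =>
    intro prev run
    simp only [List.reverse_nil, List.nil_append, pvRunR, pvRunF, pvRunAs]
    ring_nf
  | cons d l ih =>
    intro prev run
    have h2 : (d :: l).reverse ++ [prev] = (l.reverse ++ [d]) ++ [prev] := by simp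
    rw [h2, pvRunF_append _ _ _ (by simp)]
    have hlast : (l.reverse ++ [d]).getLastD 0 = d := by
      simp [List.getLastD_eq_getLast?]
    rw [hlast]
    simp only [pvRunR]
    by_cases hc : d = prev + 1
    · rw [if_pos hc, if_pos (by omega), ih d (run + 1)]
      norm_num
    · rw [if_neg hc, if_neg (by omega), ih d 1]
      ring_nf

-- decomposition of B's loop into components over its LSD digit list
theorem pvLoopB_decomp (m : Int) : ∀ (prev run score runs : Int),
    pvLoopB m prev run score runs
      = score + runs + pvSumDig (pvRevDigits m) + 3 * pvFiveR (pvRevDigits m) prev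
          + pvRunR (pvRevDigits m) prev run := by
  induction hk : m.toNat using Nat.strong_induction_on generalizing m with
  | _ k ih =>
    subst hk
    intro prev run score runs
    by_cases h : 0 < m
    · rw [pvLoopB, pvRevDigits]
      simp only [dif_pos h]
      have hdec : (PySem.Int.floordiv m 10).toNat < m.toNat := by
        rw [PySem.Int.floordiv_eq_ediv_of_pos (by omega : (0:Int) < 10)]; omega
      have ihm := ih _ hdec (PySem.Int.floordiv m 10) rfl
      simp only [pvSumDig, pvFiveR, pvRunR, pvDigScore]
      by_cases hc : PySem.Int.mod m 10 = prev + 1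
      · rw [if_pos hc, ihm, if_pos hc]
        split_ifs <;> ring_nf
      · rw [if_neg hc, ihm, if_neg hc]
        split_ifs <;> ring_nf
    · rw [pvLoopB, pvRevDigits]
      simp only [dif_neg h]
      simp [pvSumDig, pvFiveR, pvRunR]

-- every digit produced by pvDigitsRevN is < 10
theorem pvDigitsRevN_lt (n : Nat) : ∀ d ∈ pvDigitsRevN n, d < 10 := by
  induction n using pvDigitsRevN.induct with
  | case1 n h => intro d hd; rw [pvDigitsRevN, dif_pos h] at hd; simp at hd; omega
  | case2 n h ih =>
    intro d hd
    rw [pvDigitsRevN, dif_neg h] at hd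
    rcases List.mem_cons.mp hd with h1 | h1
    · omega
    · exact ih d h1

-- Nat.toDigitsCore with enough fuel produces the reversed LSD digit chars
theorem pvToDigitsCore_eq (fuel : Nat) : ∀ (n : Nat) (ds : List Char), n < fuel →
    Nat.toDigitsCore 10 fuel n ds = ((pvDigitsRevN n).map Nat.digitChar).reverse ++ ds := by
  induction fuel with
  | zero => intro n ds h; omega
  | succ fuel ih =>
    intro n ds h
    simp only [Nat.toDigitsCore]
    by_cases h0 : n / 10 = 0
    · rw [if_pos h0]
      have hn : n < 10 := by omega
      rw [pvDigitsRevN, dif_pos hn, Nat.mod_eq_of_lt hn]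
      simp
    · rw [if_neg h0]
      have hn : ¬ n < 10 := by omega
      conv_rhs => rw [pvDigitsRevN]
      rw [dif_neg hn, ih (n / 10) _ (by omega)]
      simp

theorem pvToDigits_eq (n : Nat) :
    Nat.toDigits 10 n = ((pvDigitsRevN n).map Nat.digitChar).reverse := by
  have := pvToDigitsCore_eq (n + 1) n [] (by omega)
  simpa [Nat.toDigits] using this

-- the Nat digit list cast to Int is: last Python digit :: B's loop digits
theorem pvDigits_bridge (n : Int) : 0 ≤ n →
    (pvDigitsRevN n.toNat).map (Nat.cast : Nat → Int)
      = PySem.Int.mod n 10 :: pvRevDigits (PySem.Int.floordiv n 10) := by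
  induction hk : n.toNat using Nat.strong_induction_on generalizing n with
  | _ k ih =>
    subst hk
    intro hn
    rw [PySem.Int.mod_eq_emod_of_pos (by omega),
        PySem.Int.floordiv_eq_ediv_of_pos (by omega)]
    by_cases h10 : n.toNat < 10
    · rw [pvDigitsRevN, dif_pos h10]
      rw [pvRevDigits]
      rw [dif_neg (show ¬ (0:Int) < n / 10 by omega)]
      simp only [List.map_cons, List.map_nil, List.cons.injEq, and_true]
      omega
    · rw [pvDigitsRevN, dif_neg h10]
      have hlt : n.toNat / 10 < n.toNat := by omega
      have hdiv : (n / 10).toNat = n.toNat / 10 := by omega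
      have hpos : (0:Int) ≤ n / 10 := by omega
      have hrec := ih (n.toNat / 10) hlt (n / 10) hdiv hpos
      rw [PySem.Int.mod_eq_emod_of_pos (by omega : (0:Int) < 10),
          PySem.Int.floordiv_eq_ediv_of_pos (by omega : (0:Int) < 10)] at hrec
      rw [List.map_cons, hrec]
      conv_rhs => rw [pvRevDigits]
      rw [dif_pos (show (0:Int) < n / 10 by omega)]
      rw [PySem.Int.mod_eq_emod_of_pos (by omega : (0:Int) < 10),
          PySem.Int.floordiv_eq_ediv_of_pos (by omega : (0:Int) < 10)]
      simp only [List.cons.injEq]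
      exact ⟨by omega, by trivial⟩

-- ===== VERDICT (by name: the statement is the Claim_ definition above) =====
theorem compute_number_score_spec : Claim_equal_compute_number_score := by
  intro n _hdom hpre
  have hn : (0:Int) ≤ n := hpre
  unfold Spec_compute_number_score
  unfold compute_number_score compute_number_score_alt
  simp only [PySem.Int.toList_toStr]
  -- A's char list
  have htc : PySem.Int.toChars n = ((pvDigitsRevN n.toNat).map Nat.digitChar).reverse := by
    unfold PySem.Int.toChars
    rw [if_neg (by omega : ¬ n < 0)]
    exact pvToDigits_eq n.toNat
  set ds := pvDigitsRevN n.toNat with hds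
  have hlt := pvDigitsRevN_lt n.toNat
  rw [htc]
  have hrevmap : ((ds.map Nat.digitChar).reverse) = (ds.reverse.map Nat.digitChar) := by
    simp
  rw [hrevmap, pvLoopA_toI ds.reverse _ _ _ _ (by intro d hd; exact hlt d (List.mem_reverse.mp hd))]
  rw [pvLoopAI_decomp]
  rw [pvFiveAI_pairs _ 0 le_rfl]
  -- the int digit lists
  have hbr := pvDigits_bridge n hn
  set d0 := PySem.Int.mod n 10 with hd0
  set rs := pvRevDigits (PySem.Int.floordiv n 10) with hrs
  have hD : ds.reverse.map (Nat.cast : Nat → Int) = rs.reverse ++ [d0] := by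
    rw [List.map_reverse, hbr, List.reverse_cons]
  rw [hD]
  rw [pvLoopB_decomp, ← hrs]
  rw [pvSumDig_append, pvSumDig_reverse, pvFiveR_pairs]
  -- run component
  rw [pvRunF_start (rs.reverse ++ [d0]) (by simp)]
  have hrunR : pvRunR rs d0 1 = pvRunF (rs.reverse ++ [d0]) 0 := by
    have := pvRunR_rev rs d0 1
    simpa using this
  rw [hrunR]
  simp only [pvSumDig, pvDigScore]
  norm_num
  ring_nf
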